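-- pv_equiv track=rewrite | github.com/menna3lwan/BioAnalyzerPro | algorithms/index_search.py | format_index_table
-- ===== SOURCE A (Python) =====
-- def format_index_table(index, max_rows=20):
--     """Format index table for display"""
--     if not index:
--         return "Index is empty\n"
--
--     result = "\n"
--     result += f"{'K-mer':<10s} {'Positions':<50s}\n"
--     result += "-" * 60 + "\n"
--
--     # Group by k-mer
--     kmer_dict = {}
--     for kmer, pos in index:
--         if kmer not in kmer_dict:
--             kmer_dict[kmer] = []
--         kmer_dict[kmer].append(pos)
--
--     # Display
--     count = 0
--     for kmer in sorted(kmer_dict.keys()):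
--         if count >= max_rows:
--             remaining = len(kmer_dict) - count
--             result += f"\n... and {remaining} more k-mers\n"
--             break
--
--         positions = kmer_dict[kmer]
--         pos_str = str(positions) if len(positions) <= 10 else str(positions[:10]) + "..."
--         result += f"{kmer:<10s} {pos_str}\n"
--         count += 1
--
--     return result
-- ===== SOURCE B (Python) =====
-- def format_index_table(index, max_rows=20):
--     """Format index table for display"""
--     if not index:
--         return "Index is empty\n"
--
--     lines = ["\n", f"{'K-mer':<10s} {'Positions':<50s}\n", "-" * 60 + "\n"]
--
--     keys = sorted({kmer for kmer, _ in index})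
--     for count, kmer in enumerate(keys):
--         if count >= max_rows:
--             lines.append(f"\n... and {len(keys) - count} more k-mers\n")
--             break
--         positions = [pos for k, pos in index if k == kmer]
--         pos_str = str(positions) if len(positions) <= 10 else str(positions[:10]) + "..."
--         lines.append(f"{kmer:<10s} {pos_str}\n")
--
--     return "".join(lines)
-- ===== Notes on version B (the rewrite author's own statement) =====
-- stated objective: simpler
-- what changed: Replaces A's dict-grouping (membership test + append) followed by sorting the dict's keys with a direct computation: sorted set of distinct k-mers, then a per-key filter comprehension to collect positions; no dict is built.
import Mathlib
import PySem

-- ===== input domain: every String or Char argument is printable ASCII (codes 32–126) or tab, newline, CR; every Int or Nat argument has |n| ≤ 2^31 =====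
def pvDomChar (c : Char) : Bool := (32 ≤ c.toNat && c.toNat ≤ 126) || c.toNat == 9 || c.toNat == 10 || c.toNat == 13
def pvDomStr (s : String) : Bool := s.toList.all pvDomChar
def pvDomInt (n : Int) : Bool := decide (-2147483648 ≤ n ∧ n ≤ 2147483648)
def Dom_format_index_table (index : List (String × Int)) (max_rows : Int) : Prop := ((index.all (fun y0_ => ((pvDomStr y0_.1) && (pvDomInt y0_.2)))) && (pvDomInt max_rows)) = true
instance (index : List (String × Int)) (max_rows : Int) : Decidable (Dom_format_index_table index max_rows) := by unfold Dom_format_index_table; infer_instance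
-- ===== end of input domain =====

-- B replaces A's dict-grouping-then-sort-keys with sorted distinct keys plus a per-key
-- filter comprehension (no dict at all); objective: simpler, same formatting.

-- shared formatting helpers: literal transliterations of the format strings both Pythons use
def pvLjust (s : List Char) (w : Nat) : List Char := s ++ List.replicate (w - s.length) ' '
def pvReprIntList (xs : List Int) : List Char :=
  '[' :: PySem.Chars.join (", ".toList) (xs.map PySem.Int.toChars) ++ [']']
def pvHeader : List Char :=
  '\n' :: (pvLjust "K-mer".toList 10 ++ [' '] ++ pvLjust "Positions".toList 50 ++ ['\n'])
  ++ List.replicate 60 '-' ++ ['\n']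
def pvPosStr (positions : List Int) : List Char :=
  if positions.length ≤ 10 then pvReprIntList positions
  else pvReprIntList (PySem.List.slice positions none (some (10 : Int))) ++ "...".toList
def pvRowLine (kmer : String) (positions : List Int) : List Char :=
  pvLjust kmer.toList 10 ++ [' '] ++ pvPosStr positions ++ ['\n']
def pvMore (remaining : Int) : List Char :=
  '\n' :: ("... and ".toList ++ PySem.Int.toChars remaining ++ " more k-mers\n".toList)

-- ===== PORT A =====
def pvGroupA (index : List (String × Int)) : PySem.Dict String (List Int) :=
  index.foldl
    (fun d p => (if d.contains p.1 then d else d.insert p.1 []).modify p.1 [] (· ++ [p.2]))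
    PySem.Dict.empty

def pvRowsA (d : PySem.Dict String (List Int)) (max_rows : Int) : List String → Int → List Char
  | [], _ => []
  | k :: ks, count =>
    if count ≥ max_rows then pvMore ((d.size : Int) - count)
    else pvRowLine k (d.getD k []) ++ pvRowsA d max_rows ks (count + 1)

def format_index_table (index : List (String × Int)) (max_rows : Int) : String :=
  if index = [] then "Index is empty\n"
  else
    String.ofList (pvHeader ++ pvRowsA (pvGroupA index) max_rows
      (PySem.List.sorted (pvGroupA index).keys (fun x => x) false) 0)

-- ===== PORT B =====
def pvRowsB (index : List (String × Int)) (total : Int) (max_rows : Int) : List String → Int → List Char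
  | [], _ => []
  | kmer :: ks, count =>
    if count ≥ max_rows then pvMore (total - count)
    else pvRowLine kmer ((index.filter (fun q => q.1 == kmer)).map (·.2))
         ++ pvRowsB index total max_rows ks (count + 1)

def format_index_table_alt (index : List (String × Int)) (max_rows : Int) : String :=
  if index = [] then "Index is empty\n"
  else
    String.ofList (pvHeader ++ pvRowsB index
      (PySem.List.len (PySem.List.sorted (PySem.Set.ofList (index.map (·.1))) (fun x => x) false)) max_rows
      (PySem.List.sorted (PySem.Set.ofList (index.map (·.1))) (fun x => x) false) 0)

-- ===== PRECONDITION & SPEC =====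
def Spec_format_index_table (index : List (String × Int)) (max_rows : Int) (out : String) : Prop := out = format_index_table_alt index max_rows
instance (index : List (String × Int)) (max_rows : Int) (out : String) : Decidable (Spec_format_index_table index max_rows out) := by unfold Spec_format_index_table; infer_instance

-- ===== CLAIM (what is proved, stated in full; the proofs are below) =====
def Claim_equal_format_index_table : Prop := ∀ (index : List (String × Int)) (max_rows : Int), Dom_format_index_table index max_rows → Spec_format_index_table index max_rows (format_index_table index max_rows)

-- ===== LEMMAS AND PROOFS =====

-- A's membership-test-then-append grouping step is exactly Dict.modify with default []
theorem pvGroupA_step {d : PySem.Dict String (List Int)} (k : String) (v : Int) :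
    (if d.contains k then d else d.insert k []).modify k [] (· ++ [v])
      = d.modify k [] (· ++ [v]) := by
  by_cases h : d.contains k
  · simp [h]
  · rw [if_neg (by simp [h])]
    simp only [PySem.Dict.modify]
    rw [PySem.Dict.getD_insert_self, PySem.Dict.insert_insert_self,
      PySem.Dict.getD_of_not_contains (h := by simpa using h)]

theorem pvGroupA_eq_modify (index : List (String × Int)) :
    pvGroupA index
      = index.foldl (fun d p => d.modify p.1 [] (· ++ [p.2])) PySem.Dict.empty := by
  unfold pvGroupA
  congr 1
  funext d p
  exact pvGroupA_step p.1 p.2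

theorem pvGroupA_keys (index : List (String × Int)) :
    (pvGroupA index).keys = PySem.Set.ofList (index.map (·.1)) := by
  rw [pvGroupA_eq_modify,
    PySem.Dict.keys_foldl_modify_key index (·.1) [] (fun _ p v => v ++ [p.2]) PySem.Dict.empty]
  rfl

theorem pvGroupA_getD (index : List (String × Int)) (k : String) :
    (pvGroupA index).getD k [] = (index.filter (fun q => q.1 == k)).map (·.2) := by
  rw [pvGroupA_eq_modify, PySem.Dict.getD_foldl_modify_append]
  rfl

theorem pvRows_eq (index : List (String × Int)) (d : PySem.Dict String (List Int))
    (total max_rows : Int)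
    (hget : ∀ k, d.getD k [] = (index.filter (fun q => q.1 == k)).map (·.2))
    (htot : (d.size : Int) = total) :
    ∀ (ks : List String) (count : Int),
      pvRowsA d max_rows ks count = pvRowsB index total max_rows ks count := by
  intro ks
  induction ks with
  | nil => intro count; rfl
  | cons k t ih =>
    intro count
    simp only [pvRowsA, pvRowsB, htot, hget, ih]

-- ===== VERDICT (by name: the statement is the Claim_ definition above) =====
theorem format_index_table_spec : Claim_equal_format_index_table := by
  intro index max_rows _
  unfold Spec_format_index_table format_index_table format_index_table_alt
  by_cases h : index = []
  · simp [h]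
  · rw [if_neg h, if_neg h, pvGroupA_keys]
    congr 1
    congr 1
    apply pvRows_eq
    · exact pvGroupA_getD index
    · rw [PySem.List.len_eq, PySem.List.length_sorted, ← pvGroupA_keys]
      simp [PySem.Dict.keys, PySem.Dict.size]
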